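-- pv_equiv track=rewrite | github.com/Loeiii/Reschedule-Diffusion-based-Bokeh-Rendering | model/bokeh_modules/diffusion.py | find_first_smaller_index
-- ===== SOURCE A (Python) =====
-- def find_first_smaller_index(tensor, target):
--     left, right = 0, len(tensor) - 1
--     result = -1
--
--     while left <= right:
--         mid = (left + right) // 2
--
--         if tensor[mid] < target:
--             result = mid
--             right = mid - 1
--         else:
--             left = mid + 1
--
--     return result
-- ===== SOURCE B (Python) =====
-- def find_first_smaller_index(tensor, target):
--     # Half-open interval [lo, hi): hi itself always records the best candidate
--     # index found so far (initially n = "none"), so no separate result variable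
--     # is needed; the final hi is the answer, with n mapped to -1.
--     n = len(tensor)
--
--     def locate(lo, hi):
--         if lo >= hi:
--             return hi
--         mid = (lo + hi - 1) // 2
--         if tensor[mid] < target:
--             return locate(lo, mid)
--         return locate(mid + 1, hi)
--
--     h = locate(0, n)
--     return -1 if h == n else h
-- ===== Notes on version B (the rewrite author's own statement) =====
-- stated objective: alternative
-- what changed: A's iterative closed-interval loop over (left, right, result) with a best-so-far accumulator is replaced by a recursive half-open-interval search over (lo, hi) with no accumulator: the upper bound hi itself carries the answer, and the top level maps a final hi of n to -1.
import Mathlib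
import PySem

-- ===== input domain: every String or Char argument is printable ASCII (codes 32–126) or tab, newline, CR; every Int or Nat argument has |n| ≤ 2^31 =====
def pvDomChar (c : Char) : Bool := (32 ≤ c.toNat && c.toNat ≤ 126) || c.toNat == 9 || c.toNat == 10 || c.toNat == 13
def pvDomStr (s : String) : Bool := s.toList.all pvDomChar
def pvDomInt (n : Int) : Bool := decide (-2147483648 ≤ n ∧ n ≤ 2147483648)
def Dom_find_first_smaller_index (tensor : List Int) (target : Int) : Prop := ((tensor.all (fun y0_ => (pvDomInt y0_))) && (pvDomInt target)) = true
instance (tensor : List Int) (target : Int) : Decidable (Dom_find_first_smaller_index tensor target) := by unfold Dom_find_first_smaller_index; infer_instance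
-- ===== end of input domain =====

-- B replaces A's iterative closed-interval loop with a best-so-far accumulator by a
-- recursive half-open-interval search whose upper bound hi itself carries the answer
-- (objective: alternative, same cost).

-- ===== PORT A =====
-- the while-loop of A over state (left, right, result), closed interval [left, right]
def ffsiLoop (tensor : List Int) (target left right result : Int) : Int :=
  if left ≤ right then
    let mid := PySem.Int.floordiv (left + right) 2
    if PySem.List.pyGetD tensor mid 0 < target then
      ffsiLoop tensor target left (mid - 1) mid
    else
      ffsiLoop tensor target (mid + 1) right result
  else result
termination_by (right + 1 - left).toNat
decreasing_by
  · have h := PySem.Int.floordiv_two_mid_bounds (by assumption : left ≤ right)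
    omega
  · have h := PySem.Int.floordiv_two_mid_bounds (by assumption : left ≤ right)
    omega

def find_first_smaller_index (tensor : List Int) (target : Int) : Int :=
  ffsiLoop tensor target 0 ((tensor.length : Int) - 1) (-1)

-- ===== PORT B =====
-- B's recursive helper 'locate' over the half-open interval [lo, hi); returns the final hi
def ffsiLocate (tensor : List Int) (target lo hi : Int) : Int :=
  if lo ≥ hi then hi
  else
    let mid := PySem.Int.floordiv (lo + hi - 1) 2
    if PySem.List.pyGetD tensor mid 0 < target then
      ffsiLocate tensor target lo mid
    else
      ffsiLocate tensor target (mid + 1) hi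
termination_by (hi - lo).toNat
decreasing_by
  · have heq : lo + hi - 1 = lo + (hi - 1) := by ring
    have h := PySem.Int.floordiv_two_mid_bounds (by omega : lo ≤ hi - 1)
    rw [← heq] at h
    omega
  · have heq : lo + hi - 1 = lo + (hi - 1) := by ring
    have h := PySem.Int.floordiv_two_mid_bounds (by omega : lo ≤ hi - 1)
    rw [← heq] at h
    omega

def find_first_smaller_index_alt (tensor : List Int) (target : Int) : Int :=
  let h := ffsiLocate tensor target 0 (tensor.length : Int)
  if h = (tensor.length : Int) then -1 else h

-- ===== PRECONDITION & SPEC =====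
def Spec_find_first_smaller_index (tensor : List Int) (target : Int) (out : Int) : Prop := out = find_first_smaller_index_alt tensor target
instance (tensor : List Int) (target : Int) (out : Int) : Decidable (Spec_find_first_smaller_index tensor target out) := by unfold Spec_find_first_smaller_index; infer_instance

-- ===== CLAIM (what is proved, stated in full; the proofs are below) =====
def Claim_equal_find_first_smaller_index : Prop := ∀ (tensor : List Int) (target : Int), Dom_find_first_smaller_index tensor target → Spec_find_first_smaller_index tensor target (find_first_smaller_index tensor target)

-- ===== LEMMAS AND PROOFS =====

-- locate never returns more than its upper bound
theorem ffsiLocate_le (tensor : List Int) (target : Int) :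
    ∀ n : Nat, ∀ lo hi : Int, (hi - lo).toNat ≤ n →
      ffsiLocate tensor target lo hi ≤ hi := by
  intro n
  induction n with
  | zero =>
      intro lo hi hn
      rw [ffsiLocate]
      simp only [if_pos (by omega : lo ≥ hi)]
      exact le_rfl
  | succ n ih =>
      intro lo hi hn
      by_cases hge : lo ≥ hi
      · rw [ffsiLocate]; simp only [if_pos hge]; exact le_rfl
      · have heq : lo + hi - 1 = lo + (hi - 1) := by ring
        have hb := PySem.Int.floordiv_two_mid_bounds (by omega : lo ≤ hi - 1)
        rw [← heq] at hb
        rw [ffsiLocate]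
        simp only [if_neg hge]
        by_cases hcmp : PySem.List.pyGetD tensor (PySem.Int.floordiv (lo + hi - 1) 2) 0 < target
        · simp only [if_pos hcmp]
          have := ih lo (PySem.Int.floordiv (lo + hi - 1) 2) (by omega)
          omega
        · simp only [if_neg hcmp]
          exact ih (PySem.Int.floordiv (lo + hi - 1) 2 + 1) hi (by omega)

-- A's loop equals B's locate with the result accumulator substituted for an unchanged hi:
-- ffsiLoop left right result = if locate left (right+1) = right+1 then result else locate left (right+1)
theorem ffsi_main (tensor : List Int) (target : Int) :
    ∀ n : Nat, ∀ left right result : Int, (right + 1 - left).toNat ≤ n →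
      ffsiLoop tensor target left right result =
        (if ffsiLocate tensor target left (right + 1) = right + 1 then result
         else ffsiLocate tensor target left (right + 1)) := by
  intro n
  induction n with
  | zero =>
      intro left right result hn
      rw [ffsiLoop, ffsiLocate]
      simp only [if_neg (by omega : ¬ left ≤ right), if_pos (by omega : left ≥ right + 1)]
      simp
  | succ n ih =>
      intro left right result hn
      by_cases hle : left ≤ right
      · have hb := PySem.Int.floordiv_two_mid_bounds hle
        have hmid : left + (right + 1) - 1 = left + right := by ring
        rw [ffsiLoop, ffsiLocate]
        simp only [if_pos hle, if_neg (by omega : ¬ left ≥ right + 1), hmid]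
        by_cases hcmp : PySem.List.pyGetD tensor (PySem.Int.floordiv (left + right) 2) 0 < target
        · simp only [if_pos hcmp]
          set mid := PySem.Int.floordiv (left + right) 2 with hmiddef
          have hle2 : ffsiLocate tensor target left mid ≤ mid :=
            ffsiLocate_le tensor target ((mid - left).toNat) left mid le_rfl
          have hne : ¬ ffsiLocate tensor target left mid = right + 1 := by omega
          rw [ih left (mid - 1) mid (by omega)]
          have hm1 : mid - 1 + 1 = mid := by ring
          rw [hm1, if_neg hne]
          split <;> omega
        · simp only [if_neg hcmp]
          exact ih (PySem.Int.floordiv (left + right) 2 + 1) right result (by omega)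
      · rw [ffsiLoop, ffsiLocate]
        simp only [if_neg hle, if_pos (by omega : left ≥ right + 1)]
        simp

-- ===== VERDICT (by name: the statement is the Claim_ definition above) =====
theorem find_first_smaller_index_spec : Claim_equal_find_first_smaller_index := by
  intro tensor target _
  unfold Spec_find_first_smaller_index find_first_smaller_index find_first_smaller_index_alt
  have h := ffsi_main tensor target ((tensor.length : Int)).toNat 0
    ((tensor.length : Int) - 1) (-1) (by omega)
  have hlen : (tensor.length : Int) - 1 + 1 = (tensor.length : Int) := by ring
  rw [hlen] at h
  rw [h]
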